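-- pv_equiv track=rewrite | github.com/pepefeliblu/FreelancePay | main.py | analyze_time_source
-- ===== SOURCE A (Python) =====
-- def analyze_time_source(tasks):
--     """Analyze what time sources were used for reporting transparency."""
--     jira_logged = 0
--     jira_estimated = 0
--     git_estimated = 0
--
--     for task in tasks:
--         if task.get('jira_time_spent', 0) > 0 or task.get('jira_aggregate_time', 0) > 0:
--             jira_logged += 1
--         elif task.get('jira_time_estimate', 0) > 0:
--             jira_estimated += 1
--         else:
--             git_estimated += 1
--
--     return {
--         'jira_logged': jira_logged,
--         'jira_estimated': jira_estimated,
--         'git_estimated': git_estimated,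
--         'total': len(tasks)
--     }
-- ===== SOURCE B (Python) =====
-- def analyze_time_source(tasks):
--     """Analyze what time sources were used for reporting transparency."""
--     def category(t):
--         # unit count-vector (jira_logged, jira_estimated, git_estimated)
--         if t.get('jira_time_spent', 0) > 0 or t.get('jira_aggregate_time', 0) > 0:
--             return (1, 0, 0)
--         if t.get('jira_time_estimate', 0) > 0:
--             return (0, 1, 0)
--         return (0, 0, 1)
--
--     def tally(ts):
--         # divide and conquer: merge the count-vectors of the two halves
--         if len(ts) == 0:
--             return (0, 0, 0)
--         if len(ts) == 1:
--             return category(ts[0])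
--         mid = len(ts) // 2
--         l = tally(ts[:mid])
--         r = tally(ts[mid:])
--         return (l[0] + r[0], l[1] + r[1], l[2] + r[2])
--
--     jl, je, ge = tally(tasks)
--     return {
--         'jira_logged': jl,
--         'jira_estimated': je,
--         'git_estimated': ge,
--         'total': len(tasks),
--     }
-- ===== Notes on version B (the rewrite author's own statement) =====
-- stated objective: alternative
-- what changed: Replaces A's single sequential if/elif/else counting loop with a map-reduce: each task is mapped to a unit count-vector and the vectors are summed by a divide-and-conquer recursion on list halves.
import Mathlib
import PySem

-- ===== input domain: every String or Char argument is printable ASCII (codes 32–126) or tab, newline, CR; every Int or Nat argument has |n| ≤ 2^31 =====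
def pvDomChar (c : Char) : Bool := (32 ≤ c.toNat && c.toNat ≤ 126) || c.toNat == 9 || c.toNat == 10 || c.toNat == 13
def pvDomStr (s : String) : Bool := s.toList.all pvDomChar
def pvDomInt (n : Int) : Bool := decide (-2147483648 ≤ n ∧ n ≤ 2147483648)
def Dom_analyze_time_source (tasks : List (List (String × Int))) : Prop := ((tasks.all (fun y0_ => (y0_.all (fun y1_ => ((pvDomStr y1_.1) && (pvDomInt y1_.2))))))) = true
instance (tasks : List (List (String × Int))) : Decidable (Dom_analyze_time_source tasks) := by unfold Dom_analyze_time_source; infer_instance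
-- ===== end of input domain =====

-- B replaces A's sequential if/elif/else counting loop by a map-reduce:
-- unit count-vectors merged by divide-and-conquer (objective: alternative).

-- ===== PORT A =====
-- task.get(k, 0) on the association-list dict (exact: Dict lookup = first match)
def pvGet (t : List (String × Int)) (k : String) : Int := (PySem.Dict.mk t).getD k 0

-- one pass, three counters, sequential branch (literal transliteration of A's loop)
def analyze_time_source (tasks : List (List (String × Int))) : List (String × Int) :=
  let r : Int × Int × Int := tasks.foldl (fun acc task =>
    if pvGet task "jira_time_spent" > 0 ∨ pvGet task "jira_aggregate_time" > 0 then
      (acc.1 + 1, acc.2.1, acc.2.2)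
    else if pvGet task "jira_time_estimate" > 0 then
      (acc.1, acc.2.1 + 1, acc.2.2)
    else
      (acc.1, acc.2.1, acc.2.2 + 1)) (0, 0, 0)
  [("jira_logged", r.1), ("jira_estimated", r.2.1), ("git_estimated", r.2.2), ("total", (tasks.length : Int))]

-- ===== PORT B =====
-- each task's unit count-vector (jira_logged, jira_estimated, git_estimated)
def atsCategory (t : List (String × Int)) : Int × Int × Int :=
  if pvGet t "jira_time_spent" > 0 ∨ pvGet t "jira_aggregate_time" > 0 then (1, 0, 0)
  else if pvGet t "jira_time_estimate" > 0 then (0, 1, 0)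
  else (0, 0, 1)

-- divide and conquer: merge the count-vectors of the two halves (B's tally)
def atsTally : List (List (String × Int)) → Int × Int × Int
  | [] => (0, 0, 0)
  | [t] => atsCategory t
  | a :: b :: rest =>
      let ts := a :: b :: rest
      let mid := ts.length / 2
      let l := atsTally (ts.take mid)
      let r := atsTally (ts.drop mid)
      (l.1 + r.1, l.2.1 + r.2.1, l.2.2 + r.2.2)
termination_by l => l.length
decreasing_by
  · simp only [ts, mid, List.length_take, List.length_cons]; omega
  · simp only [ts, mid, List.length_drop, List.length_cons]; omega

def analyze_time_source_alt (tasks : List (List (String × Int))) : List (String × Int) :=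
  let v := atsTally tasks
  [("jira_logged", v.1), ("jira_estimated", v.2.1),
   ("git_estimated", v.2.2), ("total", (tasks.length : Int))]

-- ===== PRECONDITION & SPEC =====
def Spec_analyze_time_source (tasks : List (List (String × Int))) (out : List (String × Int)) : Prop := out = analyze_time_source_alt tasks
instance (tasks : List (List (String × Int))) (out : List (String × Int)) : Decidable (Spec_analyze_time_source tasks out) := by unfold Spec_analyze_time_source; infer_instance

-- ===== CLAIM =====
def Claim_equal_analyze_time_source : Prop := ∀ (tasks : List (List (String × Int))), Dom_analyze_time_source tasks → Spec_analyze_time_source tasks (analyze_time_source tasks)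

-- ===== LEMMAS AND PROOFS =====

-- A's fold, from any accumulator, adds each task's count-vector in sequence
lemma ats_fold_eq (tasks : List (List (String × Int))) :
    ∀ a b c : Int,
      tasks.foldl (fun (acc : Int × Int × Int) task =>
        if pvGet task "jira_time_spent" > 0 ∨ pvGet task "jira_aggregate_time" > 0 then
          (acc.1 + 1, acc.2.1, acc.2.2)
        else if pvGet task "jira_time_estimate" > 0 then
          (acc.1, acc.2.1 + 1, acc.2.2)
        else
          (acc.1, acc.2.1, acc.2.2 + 1)) (a, b, c)
      = (a + ((tasks.map atsCategory).map Prod.fst).sum,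
         b + ((tasks.map atsCategory).map (fun v => v.2.1)).sum,
         c + ((tasks.map atsCategory).map (fun v => v.2.2)).sum) := by
  induction tasks with
  | nil => simp
  | cons t ts ih =>
    intro a b c
    by_cases hl : pvGet t "jira_time_spent" > 0 ∨ pvGet t "jira_aggregate_time" > 0
    · simp [List.foldl_cons, hl, ih, atsCategory]; ring_nf
    · by_cases he : pvGet t "jira_time_estimate" > 0
      · simp [List.foldl_cons, hl, he, ih, atsCategory]; ring_nf
      · simp [List.foldl_cons, hl, he, ih, atsCategory]; ring_nf

-- B's divide-and-conquer tally computes the componentwise sum of the count-vectors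
lemma atsTally_eq (ts : List (List (String × Int))) :
    atsTally ts = (((ts.map atsCategory).map Prod.fst).sum,
                   ((ts.map atsCategory).map (fun v => v.2.1)).sum,
                   ((ts.map atsCategory).map (fun v => v.2.2)).sum) := by
  induction ts using atsTally.induct with
  | case1 => simp [atsTally]
  | case2 t => simp [atsTally]
  | case3 a b rest lts mid ihl ihr =>
    rw [atsTally]
    show _ = _
    simp only [lts, mid, List.length_cons] at ihl ihr
    simp only [List.length_cons]
    rw [ihl, ihr]
    have hsplit : a :: b :: rest
        = (a :: b :: rest).take ((a :: b :: rest).length / 2)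
          ++ (a :: b :: rest).drop ((a :: b :: rest).length / 2) :=
      (List.take_append_drop _ _).symm
    conv_rhs => rw [hsplit]
    simp [List.sum_append]

-- ===== VERDICT =====
theorem analyze_time_source_spec : Claim_equal_analyze_time_source := by
  intro tasks _
  unfold Spec_analyze_time_source analyze_time_source analyze_time_source_alt
  rw [ats_fold_eq tasks 0 0 0, atsTally_eq]
  norm_num
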